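-- pv_equiv track=rewrite | github.com/IT-coach-666/leetcode-public | leetcode_jy/jy_1001_1500/jy_1351_1400/jy_1353.py | maxEvents_v3
-- ===== SOURCE A (Python) =====
-- import heapq
-- from collections import defaultdict
--
-- def maxEvents_v3(events):
--     # jy: res 记录能参加的会议数, T 记录最大的 date;
--     #    dic_evt[i] 为所有第 i 天开始的会议的结束时间;
--     res, T = 0, 0
--     dic_evt = defaultdict(list)
--     for evt in events:
--         dic_evt[evt[0]].append(evt[1])
--         T = max(T, evt[1])
--
--     # jy: 遍历 1~T 中的每一个 date;
--     que_able = []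
--     for i in range(1, T+1):
--         # jy: 用 que_able 保存第 i 天可参加的会议的结束时间, 并将其构造成最小堆结构;
--         for end in dic_evt[i]:
--             heapq.heappush(que_able, end)
--         # jy: 在最小堆 que_able 中 pop 出结束时间小于 i 的(第一轮循环时得到的 que_able
--         #    肯定是均大于首个有效 i 值的, 但由于循环后 que_able 中的数值不一定是被全
--         #    部清空的, 故可能后续遍历的 i 是大于 que_able 中的部分数值的); 结束时间小
--         #    于当前 i 的是肯定不能完成当任务的, 故需要剔除;
--         while que_able and que_able[0] < i:
--             heapq.heappop(que_able)
--         # jy: 此时 que_able 中的最小 date 即可用来完成当前任务 i (因为 que_able 中的 date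
--         #    都是大于 i 的; que_able 中的值肯定是对应相应的任务, 如果 que_able 中有值,
--         #    且也满足所有值均大于 i, 则表示该 que_able 中结束时间最小的 date 对应的任务
--         #    肯定是可以通过 [i, date] 中的某个时间来完成的;
--         if que_able:
--             res += 1
--             heapq.heappop(que_able)
--     # jy: 最终返回的 res 即为能参加的最多 event 数;
--     return res
-- ===== SOURCE B (Python) =====
-- import heapq
--
-- def maxEvents_v3(events):
--     # Sort usable events by start day; greedy with a min-heap of end days,
--     # jumping over day ranges where nothing is pending.
--     valid = sorted(((e[0], e[1]) for e in events if 1 <= e[0] <= e[1]),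
--                    key=lambda p: p[0])
--     n = len(valid)
--     heap, res, i, d = [], 0, 0, 0
--     while i < n or heap:
--         if not heap:
--             d = valid[i][0]          # jump: skip days with nothing to attend
--         while i < n and valid[i][0] <= d:
--             heapq.heappush(heap, valid[i][1])
--             i += 1
--         while heap and heap[0] < d:  # drop events that already ended
--             heapq.heappop(heap)
--         if heap:
--             res += 1                 # attend the event ending soonest
--             heapq.heappop(heap)
--         d += 1
--     return res
-- ===== Notes on version B (the rewrite author's own statement) =====
-- stated objective: alternative
-- what changed: A builds a dict of start days and scans every calendar day 1..max_end pushing/popping a heap; B instead sorts the usable events by start day and runs the heap greedy only over event-relevant days, jumping over day ranges where the heap is empty, so its work is bounded by the number of events rather than the day horizon.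
import Mathlib
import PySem

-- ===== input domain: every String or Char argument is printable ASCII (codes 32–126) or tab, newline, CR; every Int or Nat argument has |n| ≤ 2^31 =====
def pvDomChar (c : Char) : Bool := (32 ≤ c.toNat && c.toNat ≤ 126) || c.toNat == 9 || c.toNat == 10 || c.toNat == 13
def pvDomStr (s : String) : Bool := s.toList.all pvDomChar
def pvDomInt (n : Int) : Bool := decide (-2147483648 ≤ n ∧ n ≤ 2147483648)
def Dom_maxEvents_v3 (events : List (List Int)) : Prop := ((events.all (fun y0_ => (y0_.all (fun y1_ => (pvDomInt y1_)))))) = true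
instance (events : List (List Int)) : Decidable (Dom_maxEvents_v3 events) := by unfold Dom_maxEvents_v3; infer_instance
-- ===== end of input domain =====

-- B replaces A's scan over every calendar day 1..max_end (plus a per-day dict of starts) by a
-- sort of the usable events and a heap greedy that jumps over day ranges with nothing pending.


-- shared by both ports (both Pythons use heapq on Int): the heap is modelled as a ≤-sorted list —
-- exact, because the programs only observe emptiness, the minimum heap[0], and heappop of the minimum.
def hpush (h : List Int) (e : Int) : List Int := List.orderedInsert (· ≤ ·) e h

-- 'while q and q[0] < d: heappop(q)' on the sorted-list heap model
def popStale (q : List Int) (d : Int) : List Int :=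
  match q with
  | [] => []
  | x :: t => if x < d then popStale t d else x :: t

-- evt[0] / evt[1] (total via default; Pre_ keeps them in range)
def sOf (evt : List Int) : Int := PySem.List.pyGetD evt 0 0
def eOf (evt : List Int) : Int := PySem.List.pyGetD evt 1 0

-- ===== PORT A =====
def maxEvents_v3 (events : List (List Int)) : Int :=
  -- res, T = 0, 0; dic_evt = defaultdict(list); for evt in events: dic_evt[evt[0]].append(evt[1]); T = max(T, evt[1])
  let st := events.foldl
    (fun (st : Int × Int × PySem.Dict Int (List Int)) evt =>
      (st.1, max st.2.1 (eOf evt), st.2.2.modify (sOf evt) [] (· ++ [eOf evt])))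
    (0, 0, PySem.Dict.empty)
  -- que_able = []; for i in range(1, T+1): pushes, stale pops, attend
  let fin := (PySem.List.pyRange 1 (st.2.1 + 1) 1).foldl
    (fun (rq : Int × List Int) i =>
      let q := (st.2.2.getD i []).foldl hpush rq.2
      let q := popStale q i
      if q.isEmpty then (rq.1, q) else (rq.1 + 1, q.tail))
    (st.1, [])
  fin.1

-- ===== PORT B =====
-- valid = sorted(((e[0], e[1]) for e in events if 1 <= e[0] <= e[1]), key=lambda p: p[0])
def validOf (events : List (List Int)) : List (Int × Int) :=
  PySem.List.sorted
    ((events.filter (fun e => decide (1 ≤ sOf e ∧ sOf e ≤ eOf e))).map (fun e => (sOf e, eOf e)))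
    (fun p => p.1) false

-- 'while i < n and valid[i][0] <= d: heappush(heap, valid[i][1]); i += 1'
def pushLoop (va : List (Int × Int)) (d : Int) (i : Nat) (h : List Int) : Nat × List Int :=
  if hlt : i < va.length then
    if (va[i]).1 ≤ d then pushLoop va d (i + 1) (hpush h (va[i]).2) else (i, h)
  else (i, h)
termination_by va.length - i

-- the main 'while i < n or heap' loop; the fuel (2*n+1 at the call site) only makes it total —
-- goB_eq below shows the loop always exits before the fuel runs out
def goB (va : List (Int × Int)) : Nat → Nat → List Int → Int → Int → Int
  | 0, _, _, _, res => res
  | fuel + 1, i, h, d, res =>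
    if i < va.length ∨ h ≠ [] then
      let d := if h.isEmpty then (va.getD i (0, 0)).1 else d
      let ih := pushLoop va d i h
      let h2 := popStale ih.2 d
      if h2.isEmpty then goB va fuel ih.1 h2 (d + 1) res
      else goB va fuel ih.1 h2.tail (d + 1) (res + 1)
    else res

def maxEvents_v3_alt (events : List (List Int)) : Int :=
  let va := validOf events
  goB va (2 * va.length + 1) 0 [] 0 0

-- ===== PRECONDITION & SPEC =====
-- Pre_ excludes exactly the inputs where Python A raises IndexError: an inner list with fewer than 2 elements.
def Pre_maxEvents_v3 (events : List (List Int)) : Prop := ∀ e ∈ events, 2 ≤ e.length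
instance (events : List (List Int)) : Decidable (Pre_maxEvents_v3 events) := by
  unfold Pre_maxEvents_v3; infer_instance

def pvWitness_maxEvents_v3 : List (List Int) := [[1, 2], [2, 3], [1, 1]]

def Spec_maxEvents_v3 (events : List (List Int)) (out : Int) : Prop := out = maxEvents_v3_alt events
instance (events : List (List Int)) (out : Int) : Decidable (Spec_maxEvents_v3 events out) := by
  unfold Spec_maxEvents_v3; infer_instance

-- ===== CLAIM (what is proved, stated in full; the proofs are below) =====
def Claim_equal_maxEvents_v3 : Prop := ∀ (events : List (List Int)), Dom_maxEvents_v3 events → Pre_maxEvents_v3 events → Spec_maxEvents_v3 events (maxEvents_v3 events)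

-- ===== LEMMAS AND PROOFS =====

-- proof-side abbreviations: the max end day, the dict A builds, one calendar day of the greedy
def Tval (events : List (List Int)) : Int := events.foldl (fun t e => max t (eOf e)) 0

def dicOf (events : List (List Int)) : PySem.Dict Int (List Int) :=
  events.foldl (fun d evt => d.modify (sOf evt) [] (· ++ [eOf evt])) PySem.Dict.empty

def qstep (L : List Int) (rq : Int × List Int) (i : Int) : Int × List Int :=
  let q := L.foldl hpush rq.2
  let q := popStale q i
  if q.isEmpty then (rq.1, q) else (rq.1 + 1, q.tail)

def pushesAt (va : List (Int × Int)) (j : Int) : List Int :=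
  (va.filter (fun p => p.1 == j)).map (·.2)

lemma pushall_perm (l : List Int) (q : List Int) : (l.foldl hpush q).Perm (q ++ l) := by
  induction l generalizing q with
  | nil => simp
  | cons x l ih =>
    simp only [List.foldl_cons]
    exact (ih (hpush q x)).trans
      (((List.perm_orderedInsert _ x q).append_right l).trans List.perm_middle.symm)

lemma pushall_sorted (l : List Int) (q : List Int) (hq : q.Pairwise (· ≤ ·)) :
    (l.foldl hpush q).Pairwise (· ≤ ·) := by
  induction l generalizing q with
  | nil => exact hq
  | cons x l ih =>
    exact ih _ (List.Pairwise.orderedInsert x q hq)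

lemma sorted_eq_of_perm {l₁ l₂ : List Int} (hp : l₁.Perm l₂)
    (h₁ : l₁.Pairwise (· ≤ ·)) (h₂ : l₂.Pairwise (· ≤ ·)) : l₁ = l₂ :=
  hp.eq_of_pairwise (fun _ _ _ _ hab hba => le_antisymm hab hba) h₁ h₂

lemma popStale_eq_filter (q : List Int) (d : Int) (hq : q.Pairwise (· ≤ ·)) :
    popStale q d = q.filter (fun x => decide (d ≤ x)) := by
  induction q with
  | nil => rfl
  | cons x t ih =>
    rcases List.pairwise_cons.mp hq with ⟨hx, ht⟩
    by_cases hlt : x < d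
    · simp [popStale, hlt, ih ht, show ¬ (d ≤ x) by omega]
    · have : ∀ y ∈ t, d ≤ y := fun y hy => le_trans (by omega) (hx y hy)
      have h2 : List.filter (fun x => decide (d ≤ x)) t = t :=
        List.filter_eq_self.mpr (fun y hy => decide_eq_true (this y hy))
      simp [popStale, hlt, show d ≤ x by omega, h2]

lemma popStale_eq_self (q : List Int) (d : Int) (h : ∀ x ∈ q, d ≤ x) : popStale q d = q := by
  cases q with
  | nil => rfl
  | cons x t => simp [popStale, show ¬ x < d by have := h x (by simp); omega]

lemma popStale_eq_nil (q : List Int) (d : Int) (h : ∀ x ∈ q, x < d) : popStale q d = [] := by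
  induction q with
  | nil => rfl
  | cons x t ih => simp [popStale, h x (by simp), ih (fun y hy => h y (by simp [hy]))]

lemma popStale_suffix (q : List Int) (d : Int) : popStale q d <:+ q := by
  induction q with
  | nil => exact List.suffix_rfl
  | cons x t ih =>
    by_cases hlt : x < d
    · simpa [popStale, hlt] using ih.trans (List.suffix_cons x t)
    · simp [popStale, hlt]


lemma triple_split (events : List (List Int)) :
    ∀ (a b : Int) (c : PySem.Dict Int (List Int)),
      events.foldl
        (fun (st : Int × Int × PySem.Dict Int (List Int)) evt =>
          (st.1, max st.2.1 (eOf evt), st.2.2.modify (sOf evt) [] (· ++ [eOf evt]))) (a, b, c)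
      = (a, events.foldl (fun t e => max t (eOf e)) b,
          events.foldl (fun d evt => d.modify (sOf evt) [] (· ++ [eOf evt])) c) := by
  induction events with
  | nil => intros; rfl
  | cons e l ih => intro a b c; simp only [List.foldl_cons, ih]

lemma A_eq (events : List (List Int)) :
    maxEvents_v3 events =
      ((PySem.List.pyRange 1 (Tval events + 1) 1).foldl
        (fun rq i => qstep ((dicOf events).getD i []) rq i) (0, [])).1 := by
  simp only [maxEvents_v3, triple_split, Tval, dicOf, qstep]

lemma dic_getD (events : List (List Int)) (i : Int) :
    (dicOf events).getD i [] =
      ((events.map (fun e => (sOf e, eOf e))).filter (fun p => p.1 == i)).map (·.2) := by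
  have : dicOf events =
      (events.map (fun e => (sOf e, eOf e))).foldl
        (fun d p => d.modify p.1 [] (· ++ [p.2])) PySem.Dict.empty := by
    rw [List.foldl_map]; rfl
  rw [this, PySem.Dict.getD_foldl_modify_append, PySem.Dict.getD_empty]
  simp

lemma eOf_le_Tval (events : List (List Int)) : ∀ e ∈ events, eOf e ≤ Tval events :=
  (PySem.List.le_foldl_max_int events eOf 0).2

lemma Tval_nonneg (events : List (List Int)) : 0 ≤ Tval events :=
  (PySem.List.le_foldl_max_int events eOf 0).1

lemma validOf_perm (events : List (List Int)) :
    (validOf events).Perm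
      ((events.map (fun e => (sOf e, eOf e))).filter
        (fun p => decide (1 ≤ p.1 ∧ p.1 ≤ p.2))) := by
  have h := PySem.List.sorted_perm
    (xs := (events.filter (fun e => decide (1 ≤ sOf e ∧ sOf e ≤ eOf e))).map (fun e => (sOf e, eOf e)))
    (key := fun p => p.1) (rev := false)
  rw [List.filter_map]
  exact h

lemma validOf_mem (events : List (List Int)) :
    ∀ p ∈ validOf events, 1 ≤ p.1 ∧ p.1 ≤ p.2 ∧ p.2 ≤ Tval events := by
  intro p hp
  have := (validOf_perm events).mem_iff.mp hp
  rcases List.mem_filter.mp this with ⟨hmem, hpred⟩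
  rcases List.mem_map.mp hmem with ⟨e, he, rfl⟩
  have := of_decide_eq_true hpred
  exact ⟨this.1, this.2, eOf_le_Tval events e he⟩

lemma validOf_sorted (events : List (List Int)) :
    (validOf events).Pairwise (fun a b => a.1 ≤ b.1) :=
  PySem.List.sorted_pairwise _ _

lemma noop_days (va : List (Int × Int)) (a b res : Int)
    (h : ∀ j, a ≤ j → j < b → pushesAt va j = []) :
    (PySem.List.pyRange a b 1).foldl (fun rq i => qstep (pushesAt va i) rq i) (res, []) =
      (res, []) := by
  by_cases hab : b ≤ a
  · rw [PySem.List.pyRange_one_eq_nil hab]; rfl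
  · generalize hn : (b - a).toNat = n
    induction n generalizing a with
    | zero => omega
    | succ n ih =>
      have ha : a < b := by omega
      rw [PySem.List.pyRange_one_cons ha, List.foldl_cons]
      have h0 : qstep (pushesAt va a) (res, []) a = (res, []) := by
        simp [qstep, h a le_rfl ha, popStale]
      rw [h0]
      by_cases hab2 : b ≤ a + 1
      · rw [PySem.List.pyRange_one_eq_nil hab2]; rfl
      · exact ih (a + 1) (fun j hj1 hj2 => h j (by omega) hj2) hab2 (by omega)

lemma takeWhile_eq_filter (R : List (Int × Int)) (c : Int)
    (hs : R.Pairwise (fun a b => a.1 ≤ b.1)) (hge : ∀ p ∈ R, c ≤ p.1) :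
    R.takeWhile (fun p => decide (p.1 ≤ c)) = R.filter (fun p => p.1 == c) := by
  induction R with
  | nil => rfl
  | cons x t ih =>
    rcases List.pairwise_cons.mp hs with ⟨hx, ht⟩
    by_cases hle : x.1 ≤ c
    · have hxc : x.1 = c := le_antisymm hle (hge x (by simp))
      simp only [List.takeWhile_cons, List.filter_cons, decide_eq_true hle,
        show (x.1 == c) = true by simp [hxc]]
      simp [ih ht (fun p hp => hge p (by simp [hp]))]
    · have : ∀ p ∈ x :: t, ¬ (p.1 == c) = true := by
        intro p hp
        rcases List.mem_cons.mp hp with rfl | hp'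
        · simp; omega
        · have := hx p hp'; simp; omega
      rw [List.filter_eq_nil_iff.mpr this]
      simp [List.takeWhile_cons, show ¬ decide (x.1 ≤ c) = true by simp; omega]

lemma dropWhile_ge (R : List (Int × Int)) (c : Int)
    (hs : R.Pairwise (fun a b => a.1 ≤ b.1)) :
    ∀ p ∈ R.dropWhile (fun p => decide (p.1 ≤ c)), c + 1 ≤ p.1 := by
  induction R with
  | nil => simp
  | cons x t ih =>
    rcases List.pairwise_cons.mp hs with ⟨hx, ht⟩
    by_cases hle : x.1 ≤ c
    · simpa [List.dropWhile_cons, decide_eq_true hle] using ih ht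
    · intro p hp
      rw [List.dropWhile_cons, if_neg (by simpa using hle)] at hp
      rcases List.mem_cons.mp hp with rfl | hp'
      · omega
      · have := hx p hp'; omega

lemma pushLoop_spec (va : List (Int × Int)) (d : Int) :
    ∀ i h, pushLoop va d i h =
      (i + ((va.drop i).takeWhile (fun p => decide (p.1 ≤ d))).length,
       (((va.drop i).takeWhile (fun p => decide (p.1 ≤ d))).map (·.2)).foldl hpush h) := by
  intro i
  generalize hn : va.length - i = n
  induction n generalizing i with
  | zero =>
    intro h
    have : va.length ≤ i := by omega
    rw [pushLoop, dif_neg (by omega), List.drop_eq_nil_of_le this]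
    simp
  | succ n ih =>
    intro h
    have hlt : i < va.length := by omega
    rw [pushLoop, dif_pos hlt, List.drop_eq_getElem_cons hlt, List.takeWhile_cons]
    by_cases hle : (va[i]).1 ≤ d
    · rw [if_pos hle, ih (i + 1) (by omega) (hpush h (va[i]).2)]
      simp [decide_eq_true hle]
      omega
    · rw [if_neg hle]
      simp [show ¬ decide ((va[i]).1 ≤ d) = true by simpa using hle]

lemma foldl_inv_congr {α β : Type} (days : List β) (f g : α → β → α) (inv : α → Prop)
    (init : α) (hinit : inv init)
    (h : ∀ st i, i ∈ days → inv st → f st i = g st i ∧ inv (g st i)) :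
    days.foldl f init = days.foldl g init := by
  induction days generalizing init with
  | nil => rfl
  | cons x t ih =>
    rcases h init x (by simp) hinit with ⟨heq, hinv⟩
    simp only [List.foldl_cons, heq]
    exact ih (g init x) hinv (fun st i hi => h st i (by simp [hi]))


-- the ends filtered into one calendar day agree between the dict bucket and the valid-event list
lemma filtmap (l : List (Int × Int)) (i : Int) :
    (List.map (fun p : Int × Int => p.2) (l.filter (fun p => p.1 == i))).filter
        (fun x => decide (i ≤ x)) =
      List.map (fun p : Int × Int => p.2)
        (l.filter (fun p => p.1 == i && decide (i ≤ p.2))) := by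
  induction l with
  | nil => rfl
  | cons x t ih =>
    by_cases h1 : x.1 = i <;> by_cases h2 : i ≤ x.2 <;>
      simp [List.filter_cons, h1, h2, ih]

lemma day_perm (events : List (List Int)) (i : Int) (hi : 1 ≤ i) :
    (((dicOf events).getD i []).filter (fun x => decide (i ≤ x))).Perm
      ((pushesAt (validOf events) i).filter (fun x => decide (i ≤ x))) := by
  rw [dic_getD, pushesAt, filtmap, filtmap]
  refine List.Perm.map _ ?_
  refine List.Perm.trans ?_ (((validOf_perm events).filter _).symm)
  rw [List.filter_filter]
  refine List.Perm.of_eq (List.filter_congr ?_)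
  intro p _
  by_cases h1 : p.1 = i <;> by_cases h2 : i ≤ p.2 <;> simp [h1, h2] <;> omega

lemma qstep_congr (LA LB : List Int) (i : Int)
    (hp : (LA.filter (fun x => decide (i ≤ x))).Perm (LB.filter (fun x => decide (i ≤ x))))
    (rq : Int × List Int) (hq : rq.2.Pairwise (· ≤ ·)) : qstep LA rq i = qstep LB rq i := by
  have hA := pushall_sorted LA rq.2 hq
  have hB := pushall_sorted LB rq.2 hq
  have key : popStale (LA.foldl hpush rq.2) i = popStale (LB.foldl hpush rq.2) i := by
    rw [popStale_eq_filter _ _ hA, popStale_eq_filter _ _ hB]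
    refine sorted_eq_of_perm ?_ (hA.filter _) (hB.filter _)
    refine ((pushall_perm LA rq.2).filter _).trans ?_
    refine List.Perm.trans ?_ (((pushall_perm LB rq.2).filter _).symm)
    rw [List.filter_append, List.filter_append]
    exact hp.append_left _
  simp only [qstep, key]

lemma qstep_sorted (L : List Int) (rq : Int × List Int) (i : Int)
    (hq : rq.2.Pairwise (· ≤ ·)) : (qstep L rq i).2.Pairwise (· ≤ ·) := by
  have hs := pushall_sorted L rq.2 hq
  have h2 : (popStale (L.foldl hpush rq.2) i).Pairwise (· ≤ ·) := by
    rw [popStale_eq_filter _ _ hs]; exact hs.filter _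
  simp only [qstep]
  split
  · exact h2
  · exact h2.sublist (List.tail_sublist _)

-- the main simulation lemma: B's day-skipping loop computes the day-by-day greedy over valid events
lemma goB_eq (va : List (Int × Int)) (T : Int)
    (Hva : ∀ p ∈ va, 1 ≤ p.1 ∧ p.1 ≤ p.2 ∧ p.2 ≤ T)
    (Hsort : va.Pairwise (fun a b => a.1 ≤ b.1)) :
    ∀ fuel i h d res,
      h.Pairwise (· ≤ ·) →
      (∀ e ∈ h, e ≤ T) →
      (∀ p ∈ va.take i, p.1 < d) →
      (∀ p ∈ va.drop i, d ≤ p.1) →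
      2 * (va.length - i) + h.length < fuel →
      goB va fuel i h d res =
        ((PySem.List.pyRange d (T + 1) 1).foldl
          (fun rq j => qstep (pushesAt va j) rq j) (res, h)).1 := by
  intro fuel
  induction fuel with
  | zero => intro i h d res _ _ _ _ hf; omega
  | succ fuel ihf =>
    intro i h d res Hh HhT Hlo Hhi Hfuel
    have hRsort : (va.drop i).Pairwise (fun a b => a.1 ≤ b.1) :=
      Hsort.sublist (List.drop_sublist ..)
    by_cases hcond : i < va.length ∨ h ≠ []
    · by_cases hh : h = []
      · -- jump case: empty heap, next event's start becomes the day
        subst hh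
        have hi : i < va.length := by
          rcases hcond with h' | h'
          · exact h'
          · exact absurd rfl h'
        have hgetD : va.getD i (0, 0) = va[i] := List.getD_eq_getElem va (0, 0) hi
        have hR : va.drop i = va[i] :: va.drop (i + 1) := List.drop_eq_getElem_cons hi
        have hmemva : va[i] ∈ va := List.getElem_mem hi
        have hge : ∀ p ∈ va.drop i, (va[i]).1 ≤ p.1 := by
          rw [hR]
          intro p hp
          rcases List.mem_cons.mp hp with rfl | hp'
          · exact le_rfl
          · exact (List.pairwise_cons.mp (hR ▸ hRsort)).1 p hp'
        have htw : (va.drop i).takeWhile (fun p => decide (p.1 ≤ (va[i]).1)) =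
            (va.drop i).filter (fun p => p.1 == (va[i]).1) :=
          takeWhile_eq_filter _ _ hRsort hge
        set d' := (va[i]).1 with hd'def
        set tw := (va.drop i).takeWhile (fun p => decide (p.1 ≤ d')) with htwdef
        set h' := (tw.map (fun p : Int × Int => p.2)).foldl hpush [] with hh'def
        have htwsub : ∀ p ∈ tw, p ∈ va := fun p hp =>
          List.drop_subset _ _ ((List.takeWhile_sublist _).subset hp)
        have htwfst : ∀ p ∈ tw, p.1 = d' := by
          rw [htw]
          intro p hp
          simpa using (List.mem_filter.mp hp).2
        have hperm : h'.Perm (tw.map (fun p : Int × Int => p.2)) := by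
          simpa using pushall_perm (tw.map (fun p : Int × Int => p.2)) []
        have hmemh' : ∀ x ∈ h', ∃ p ∈ tw, x = p.2 := by
          intro x hx
          rcases List.mem_map.mp (hperm.mem_iff.mp hx) with ⟨p, hp, rfl⟩
          exact ⟨p, hp, rfl⟩
        have hstale : popStale h' d' = h' := by
          refine popStale_eq_self _ _ ?_
          intro x hx
          rcases hmemh' x hx with ⟨p, hp, rfl⟩
          have h1 := htwfst p hp
          have h2 := (Hva p (htwsub p hp)).2.1
          omega
        have htwcons : tw = va[i] :: (va.drop (i + 1)).takeWhile (fun p => decide (p.1 ≤ d')) := by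
          rw [htwdef, hR, List.takeWhile_cons, if_pos (by simp [hd'def])]
        have hk1 : 1 ≤ tw.length := by rw [htwcons]; simp
        have hh'len : h'.length = tw.length := by simpa using hperm.length_eq
        have hh'ne : h' ≠ [] := by
          intro hnil
          rw [hnil] at hh'len
          simp at hh'len
          omega
        -- LHS reduces to the recursive call
        have hlhs : goB va (fuel + 1) i [] d res =
            goB va fuel (i + tw.length) h'.tail (d' + 1) (res + 1) := by
          rw [goB]
          rw [if_pos hcond]
          simp only [List.isEmpty_nil, if_pos, hgetD, pushLoop_spec]
          rw [← hd'def, ← htwdef, ← hh'def, hstale,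
            if_neg (by simpa using hh'ne)]
        rw [hlhs]
        -- RHS: skip the empty days d..d'-1, then do day d'
        have hd'le : d ≤ d' := Hhi va[i] (by rw [hR]; exact List.mem_cons_self ..)
        have hd'T : d' ≤ T := le_trans (Hva va[i] hmemva).2.1 (Hva va[i] hmemva).2.2
        have hmid : ∀ j, d ≤ j → j < d' → pushesAt va j = [] := by
          intro j hj1 hj2
          rw [pushesAt, List.filter_eq_nil_iff.mpr, List.map_nil]
          intro p hp
          rcases List.mem_append.mp ((List.take_append_drop i va) ▸ hp) with hp' | hp'
          · have := Hlo p hp'; simp; omega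
          · have := hge p hp'; simp; omega
        rw [PySem.List.pyRange_one_append d d' (T + 1) hd'le (by omega), List.foldl_append,
          show (PySem.List.pyRange d d' 1).foldl
              (fun rq j => qstep (pushesAt va j) rq j) (res, []) = (res, [])
            from noop_days va d d' res hmid,
          PySem.List.pyRange_one_cons (show d' < T + 1 by omega), List.foldl_cons]
        have hfilnil : (va.take i).filter (fun p => p.1 == d') = [] := by
          refine List.filter_eq_nil_iff.mpr ?_
          intro p hp
          have := Hlo p hp
          simp
          omega
        have hpushes : pushesAt va d' = tw.map (fun p : Int × Int => p.2) := by
          rw [pushesAt]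
          conv_lhs => rw [← List.take_append_drop i va]
          rw [List.filter_append, hfilnil, List.nil_append, ← htw]
        have hday : qstep (pushesAt va d') (res, []) d' = (res + 1, h'.tail) := by
          rw [qstep, hpushes]
          simp only [← hh'def, hstale]
          rw [if_neg (by simpa using hh'ne)]
        rw [hday]
        -- recursive call via the induction hypothesis
        refine ihf (i + tw.length) h'.tail (d' + 1) (res + 1)
          ((pushall_sorted _ _ (by simp)).sublist (List.tail_sublist _))
          ?_ ?_ ?_ ?_
        · intro e he
          rcases hmemh' e ((List.tail_sublist h').subset he) with ⟨p, hp, rfl⟩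
          exact (Hva p (htwsub p hp)).2.2
        · intro p hp
          have htk : tw = (va.drop i).take tw.length := by
            rw [htwdef]
            exact List.prefix_iff_eq_take.mp (List.takeWhile_prefix _)
          rw [List.take_add, ← htk] at hp
          rcases List.mem_append.mp hp with hp' | hp'
          · have := Hlo p hp'; omega
          · have := htwfst p hp'; omega
        · intro p hp
          rw [← List.drop_drop] at hp
          have hsplit2 : va.drop i = tw ++ (va.drop i).dropWhile (fun p => decide (p.1 ≤ d')) := by
            rw [htwdef]; exact (List.takeWhile_append_dropWhile ..).symm
          rw [hsplit2, List.drop_left] at hp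
          · exact dropWhile_ge _ _ hRsort p hp
        · have hklen : tw.length ≤ va.length - i := by
            have h1 : tw.length ≤ (va.drop i).length := by
              rw [htwdef]
              exact (List.takeWhile_sublist _).length_le
            simpa using h1
          have htl : h'.tail.length = h'.length - 1 := by simp
          omega
      · -- same-day case: heap nonempty, the day advances one at a time
        have hiE : h.isEmpty = false := by simpa using hh
        have htw : (va.drop i).takeWhile (fun p => decide (p.1 ≤ d)) =
            (va.drop i).filter (fun p => p.1 == d) :=
          takeWhile_eq_filter _ _ hRsort Hhi
        set tw := (va.drop i).takeWhile (fun p => decide (p.1 ≤ d)) with htwdef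
        set h' := (tw.map (fun p : Int × Int => p.2)).foldl hpush h with hh'def
        have htwsub : ∀ p ∈ tw, p ∈ va := fun p hp =>
          List.drop_subset _ _ ((List.takeWhile_sublist _).subset hp)
        have htwfst : ∀ p ∈ tw, p.1 = d := by
          rw [htw]
          intro p hp
          simpa using (List.mem_filter.mp hp).2
        have hperm : h'.Perm (h ++ tw.map (fun p : Int × Int => p.2)) :=
          pushall_perm (tw.map (fun p : Int × Int => p.2)) h
        have hmemh' : ∀ x ∈ h', x ∈ h ∨ ∃ p ∈ tw, x = p.2 := by
          intro x hx
          rcases List.mem_append.mp (hperm.mem_iff.mp hx) with hx' | hx'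
          · exact Or.inl hx'
          · rcases List.mem_map.mp hx' with ⟨p, hp, rfl⟩
            exact Or.inr ⟨p, hp, rfl⟩
        have hh'T : ∀ x ∈ h', x ≤ T := by
          intro x hx
          rcases hmemh' x hx with hx' | ⟨p, hp, rfl⟩
          · exact HhT x hx'
          · exact (Hva p (htwsub p hp)).2.2
        have hh'sort : h'.Pairwise (· ≤ ·) := pushall_sorted _ _ Hh
        have hh'len : h'.length = h.length + tw.length := by simpa using hperm.length_eq
        have hlhs : goB va (fuel + 1) i h d res =
            if (popStale h' d).isEmpty then goB va fuel (i + tw.length) (popStale h' d) (d + 1) res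
            else goB va fuel (i + tw.length) (popStale h' d).tail (d + 1) (res + 1) := by
          rw [goB]
          rw [if_pos hcond]
          simp only [hiE, Bool.false_eq_true, if_false, pushLoop_spec]
          rw [← htwdef, ← hh'def]
        have hlo' : ∀ p ∈ va.take (i + tw.length), p.1 < d + 1 := by
          intro p hp
          have htk : tw = (va.drop i).take tw.length := by
            rw [htwdef]
            exact List.prefix_iff_eq_take.mp (List.takeWhile_prefix _)
          rw [List.take_add, ← htk] at hp
          rcases List.mem_append.mp hp with hp' | hp'
          · have := Hlo p hp'; omega
          · have := htwfst p hp'; omega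
        have hhi' : ∀ p ∈ va.drop (i + tw.length), d + 1 ≤ p.1 := by
          intro p hp
          rw [← List.drop_drop] at hp
          have hsplit2 : va.drop i = tw ++ (va.drop i).dropWhile (fun p => decide (p.1 ≤ d)) := by
            rw [htwdef]; exact (List.takeWhile_append_dropWhile ..).symm
          rw [hsplit2, List.drop_left] at hp
          · exact dropWhile_ge _ _ hRsort p hp
        have hklen : tw.length ≤ va.length - i := by
          have h1 : tw.length ≤ (va.drop i).length := by
            rw [htwdef]
            exact (List.takeWhile_sublist _).length_le
          simpa using h1
        have hhlen1 : 1 ≤ h.length := by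
          cases h with
          | nil => exact absurd rfl hh
          | cons a t => simp
        by_cases hdT : d ≤ T
        · -- peel day d on the reference side
          rw [PySem.List.pyRange_one_cons (show d < T + 1 by omega), List.foldl_cons]
          have hfilnil : (va.take i).filter (fun p => p.1 == d) = [] := by
            refine List.filter_eq_nil_iff.mpr ?_
            intro p hp
            have := Hlo p hp
            simp
            omega
          have hpushes : pushesAt va d = tw.map (fun p : Int × Int => p.2) := by
            rw [pushesAt]
            conv_lhs => rw [← List.take_append_drop i va]
            rw [List.filter_append, hfilnil, List.nil_append, ← htw]
          have hq2sort : (popStale h' d).Pairwise (· ≤ ·) := by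
            rw [popStale_eq_filter _ _ hh'sort]; exact hh'sort.filter _
          have hq2sub : ∀ x ∈ popStale h' d, x ∈ h' := fun x hx =>
            (popStale_suffix h' d).sublist.subset hx
          have hq2len : (popStale h' d).length ≤ h'.length :=
            (popStale_suffix h' d).sublist.length_le
          have hday : qstep (pushesAt va d) (res, h) d =
              if (popStale h' d).isEmpty then (res, popStale h' d)
              else (res + 1, (popStale h' d).tail) := by
            rw [qstep, hpushes, ← hh'def]
          rw [hday]
          by_cases hq2e : (popStale h' d).isEmpty = true
          · have hq2nil : popStale h' d = [] := List.isEmpty_iff.mp hq2e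
            rw [if_pos hq2e, hlhs, if_pos hq2e, hq2nil]
            refine ihf (i + tw.length) [] (d + 1) res (by simp) (by simp) hlo' hhi' ?_
            simp only [List.length_nil, Nat.add_zero]
            omega
          · rw [if_neg hq2e, hlhs, if_neg hq2e]
            have hq2ne : popStale h' d ≠ [] := by simpa using hq2e
            have hq2len1 : 1 ≤ (popStale h' d).length := by
              cases hq : popStale h' d with
              | nil => exact absurd hq hq2ne
              | cons a t => simp
            refine ihf (i + tw.length) (popStale h' d).tail (d + 1) (res + 1)
              (hq2sort.sublist (List.tail_sublist _))
              (fun e he => hh'T e (hq2sub e ((List.tail_sublist _).subset he)))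
              hlo' hhi' ?_
            have htl : (popStale h' d).tail.length = (popStale h' d).length - 1 := by simp
            omega
        · -- the day is already past every end: both sides are done
          have hRnil : va.drop i = [] := by
            refine List.eq_nil_iff_forall_not_mem.mpr ?_
            intro p hp
            have h1 := Hhi p hp
            have h2 := (Hva p (List.drop_subset _ _ hp)).2.2
            have h3 := (Hva p (List.drop_subset _ _ hp)).2.1
            omega
          have htwnil : tw = [] := by rw [htwdef, hRnil]; rfl
          have hstale : popStale h' d = [] := by
            refine popStale_eq_nil _ _ ?_
            intro x hx
            have := hh'T x hx
            omega
          have h0 : tw.length = 0 := by rw [htwnil]; rfl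
          have h1 : va.length - i = 0 := by
            have := congrArg List.length hRnil
            simpa using this
          rw [hlhs, hstale, if_pos List.isEmpty_nil]
          rw [PySem.List.pyRange_one_eq_nil (show T + 1 ≤ d by omega), List.foldl_nil]
          have hrec := ihf (i + tw.length) [] (d + 1) res (by simp) (by simp) hlo' hhi'
            (by simp only [List.length_nil, Nat.add_zero]; omega)
          rw [hrec, PySem.List.pyRange_one_eq_nil (show T + 1 ≤ d + 1 by omega), List.foldl_nil]
    · -- loop finished: i = n and the heap is empty
      push_neg at hcond
      obtain ⟨hin, hhe⟩ := hcond
      subst hhe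
      rw [goB, if_neg (by push_neg; exact ⟨hin, rfl⟩)]
      have hpz : ∀ j, d ≤ j → j < T + 1 → pushesAt va j = [] := by
        intro j hj1 _
        rw [pushesAt, List.filter_eq_nil_iff.mpr, List.map_nil]
        intro p hp
        rcases List.mem_append.mp ((List.take_append_drop i va) ▸ hp) with hp' | hp'
        · have := Hlo p hp'; simp; omega
        · rw [List.drop_eq_nil_of_le hin] at hp'
          exact absurd hp' (List.not_mem_nil)
      rw [show (PySem.List.pyRange d (T + 1) 1).foldl
            (fun rq j => qstep (pushesAt va j) rq j) (res, []) = (res, [])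
          from noop_days va d (T + 1) res hpz]


-- ===== VERDICT (by name: the statement is the Claim_ definition above) =====
theorem maxEvents_v3_spec : Claim_equal_maxEvents_v3 := by
  intro events _ _
  unfold Spec_maxEvents_v3
  rw [A_eq]
  -- replace the dict buckets by the valid-event buckets, keeping the queue sorted
  have hcongr := foldl_inv_congr (PySem.List.pyRange 1 (Tval events + 1) 1)
    (fun rq i => qstep ((dicOf events).getD i []) rq i)
    (fun rq i => qstep (pushesAt (validOf events) i) rq i)
    (fun rq => rq.2.Pairwise (· ≤ ·)) (0, []) (by simp)
    (by
      intro st i hi hinv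
      have hi1 : 1 ≤ i := ((PySem.List.mem_pyRange_one).mp hi).1
      exact ⟨qstep_congr _ _ i (day_perm events i hi1) st hinv, qstep_sorted _ st i hinv⟩)
  rw [hcongr]
  -- B's side
  have hB := goB_eq (validOf events) (Tval events) (validOf_mem events) (validOf_sorted events)
    (2 * (validOf events).length + 1) 0 [] 0 0
    (by simp) (by simp) (by simp)
    (by intro p hp; simp only [List.drop_zero] at hp; have := (validOf_mem events p hp).1; omega)
    (by simp only [List.length_nil, Nat.add_zero, Nat.sub_zero]; omega)
  have hsplit : PySem.List.pyRange 0 (Tval events + 1) 1 =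
      PySem.List.pyRange 0 1 1 ++ PySem.List.pyRange 1 (Tval events + 1) 1 :=
    PySem.List.pyRange_one_append 0 1 (Tval events + 1) (by omega)
      (by have := Tval_nonneg events; omega)
  have hday0 : ∀ j : Int, (0:Int) ≤ j → j < 1 → pushesAt (validOf events) j = [] := by
    intro j hj0 hj1
    rw [pushesAt, List.filter_eq_nil_iff.mpr, List.map_nil]
    intro p hp
    have := (validOf_mem events p hp).1
    simp; omega
  rw [maxEvents_v3_alt]
  rw [hB, hsplit, List.foldl_append]
  rw [show (PySem.List.pyRange 0 1 1).foldl
      (fun rq j => qstep (pushesAt (validOf events) j) rq j) (0, []) = (0, [])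
    from noop_days (validOf events) 0 1 0 hday0]
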